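-- pv_equiv track=rewrite | github.com/ursa-mikail/python-gaia | Libraries/data/data_structure/json_manager.py | extract_json_content_under_N_layer
-- ===== SOURCE A (Python) =====
-- def extract_json_content_under_N_layer(contents_serialized_json, layer_number_index):
--     length_of_contents = len(contents_serialized_json)
--
--     content_extracted = []
--
--     brace_start, brace_end = '{', '}'
--     layer_count = -1  # layer_number_index is depth, starting from root which is 0
--
--     for i in range(0, length_of_contents):
--         if (contents_serialized_json[i] == brace_start):
--             layer_count = layer_count + 1
--
--         # starts recording
--         if (layer_count >= layer_number_index):
--             content_extracted.append(contents_serialized_json[i])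
--         else:
--             pass
--
--         if (contents_serialized_json[i] == brace_end):
--             layer_count = layer_count - 1
--
--     content_extracted = ''.join(content_extracted)
--     return content_extracted
-- ===== SOURCE B (Python) =====
-- def extract_json_content_under_N_layer(contents_serialized_json, layer_number_index):
--     s = contents_serialized_json
--     # pass 1: open_counts[i] = number of '{' in s[:i+1]
--     open_counts = []
--     t = 0
--     for c in s:
--         if c == '{':
--             t += 1
--         open_counts.append(t)
--     # pass 2: close_counts[i] = number of '}' in s[:i]
--     close_counts = []
--     t = 0
--     for c in s:
--         close_counts.append(t)
--         if c == '}':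
--             t += 1
--     # filter: keep s[i] iff its test depth open_counts[i] - 1 - close_counts[i] >= layer
--     return ''.join(c for c, o, cl in zip(s, open_counts, close_counts)
--                    if o - 1 - cl >= layer_number_index)
-- ===== Notes on version B (the rewrite author's own statement) =====
-- stated objective: alternative
-- what changed: Replaces A's single interleaved state machine (one mutable depth counter updated asymmetrically around the membership test) with two independent cumulative-count passes building per-index brace-count tables, then a separate zip-filter comprehension selecting characters whose table depth reaches the layer.
import Mathlib
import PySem

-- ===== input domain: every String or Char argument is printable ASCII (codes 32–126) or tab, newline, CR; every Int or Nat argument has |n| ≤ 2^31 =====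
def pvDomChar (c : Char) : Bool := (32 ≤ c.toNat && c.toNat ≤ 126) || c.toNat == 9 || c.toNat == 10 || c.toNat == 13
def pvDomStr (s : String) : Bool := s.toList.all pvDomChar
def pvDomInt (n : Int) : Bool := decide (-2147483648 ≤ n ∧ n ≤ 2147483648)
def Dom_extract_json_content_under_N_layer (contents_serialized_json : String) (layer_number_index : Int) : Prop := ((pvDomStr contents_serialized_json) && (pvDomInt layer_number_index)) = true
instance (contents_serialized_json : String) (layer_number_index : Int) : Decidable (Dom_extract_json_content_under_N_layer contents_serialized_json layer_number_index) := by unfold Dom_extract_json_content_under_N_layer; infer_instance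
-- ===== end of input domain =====

-- B replaces A's single interleaved depth-counter state machine with two independent
-- cumulative brace-count passes followed by a separate zip-filter (objective: alternative).

-- ===== PORT A =====
-- A's loop body: increment on '{', test-and-record, decrement on '}'; state = (layer_count, recorded chars)
def pvAStep (k : Int) (st : Int × List Char) (c : Char) : Int × List Char :=
  let lc := if c = '{' then st.1 + 1 else st.1
  let acc := if lc ≥ k then st.2 ++ [c] else st.2
  ((if c = '}' then lc - 1 else lc), acc)

def extract_json_content_under_N_layer (contents_serialized_json : String) (layer_number_index : Int) : String :=
  String.ofList ((contents_serialized_json.toList.foldl (pvAStep layer_number_index) (-1, [])).2)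

-- ===== PORT B =====
-- pass 1 step: open_counts[i] = number of '{' in s[:i+1]
def pvOcStep (p : Int × List Int) (c : Char) : Int × List Int :=
  let t := if c = '{' then p.1 + 1 else p.1
  (t, p.2 ++ [t])
-- pass 2 step: close_counts[i] = number of '}' in s[:i]
def pvCcStep (p : Int × List Int) (c : Char) : Int × List Int :=
  ((if c = '}' then p.1 + 1 else p.1), p.2 ++ [p.1])

def extract_json_content_under_N_layer_alt (contents_serialized_json : String) (layer_number_index : Int) : String :=
  let cs := contents_serialized_json.toList
  let oc := (cs.foldl pvOcStep (0, [])).2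
  let cc := (cs.foldl pvCcStep (0, [])).2
  String.ofList (((cs.zip (oc.zip cc)).filter
      (fun x => x.2.1 - 1 - x.2.2 ≥ layer_number_index)).map Prod.fst)

-- ===== PRECONDITION & SPEC =====
def Spec_extract_json_content_under_N_layer (contents_serialized_json : String) (layer_number_index : Int) (out : String) : Prop := out = extract_json_content_under_N_layer_alt contents_serialized_json layer_number_index
instance (contents_serialized_json : String) (layer_number_index : Int) (out : String) : Decidable (Spec_extract_json_content_under_N_layer contents_serialized_json layer_number_index out) := by unfold Spec_extract_json_content_under_N_layer; infer_instance

-- ===== CLAIM (what is proved, stated in full; the proofs are below) =====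
def Claim_equal_extract_json_content_under_N_layer : Prop := ∀ (contents_serialized_json : String) (layer_number_index : Int), Dom_extract_json_content_under_N_layer contents_serialized_json layer_number_index → Spec_extract_json_content_under_N_layer contents_serialized_json layer_number_index (extract_json_content_under_N_layer contents_serialized_json layer_number_index)

-- ===== LEMMAS AND PROOFS =====

-- common characterisation: the chars kept when starting at depth lc
def pvGo (k lc : Int) : List Char → List Char
  | [] => []
  | c :: cs =>
    let lc' := if c = '{' then lc + 1 else lc
    (if lc' ≥ k then [c] else []) ++ pvGo k (if c = '}' then lc' - 1 else lc') cs

lemma pvFoldA (k : Int) : ∀ (cs : List Char) (lc : Int) (acc : List Char),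
    (List.foldl (pvAStep k) (lc, acc) cs).2 = acc ++ pvGo k lc cs := by
  intro cs
  induction cs with
  | nil => intro lc acc; simp [pvGo]
  | cons c cs ih =>
    intro lc acc
    simp only [List.foldl_cons, pvAStep, pvGo]
    rw [ih]
    split_ifs <;> simp

def pvOc (t : Int) : List Char → List Int
  | [] => []
  | c :: cs => (if c = '{' then t + 1 else t) :: pvOc (if c = '{' then t + 1 else t) cs

def pvCc (t : Int) : List Char → List Int
  | [] => []
  | c :: cs => t :: pvCc (if c = '}' then t + 1 else t) cs

lemma pvOcSpec : ∀ (cs : List Char) (t : Int) (acc : List Int),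
    (List.foldl pvOcStep (t, acc) cs).2 = acc ++ pvOc t cs := by
  intro cs
  induction cs with
  | nil => intro t acc; simp [pvOc]
  | cons c cs ih =>
    intro t acc
    simp only [List.foldl_cons, pvOcStep, pvOc]
    rw [ih]
    simp

lemma pvCcSpec : ∀ (cs : List Char) (t : Int) (acc : List Int),
    (List.foldl pvCcStep (t, acc) cs).2 = acc ++ pvCc t cs := by
  intro cs
  induction cs with
  | nil => intro t acc; simp [pvCc]
  | cons c cs ih =>
    intro t acc
    simp only [List.foldl_cons, pvCcStep, pvCc]
    rw [ih]
    simp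

lemma pvMain (k : Int) : ∀ (cs : List Char) (o cl : Int),
    ((cs.zip ((pvOc o cs).zip (pvCc cl cs))).filter
        (fun x => x.2.1 - 1 - x.2.2 ≥ k)).map Prod.fst
      = pvGo k (o - 1 - cl) cs := by
  intro cs
  induction cs with
  | nil => intro o cl; simp [pvOc, pvCc, pvGo]
  | cons c cs ih =>
    intro o cl
    have hne : ('{' : Char) ≠ '}' := by decide
    have e1 : (o + 1 : Int) - 1 - cl = o - 1 - cl + 1 := by ring
    have e2 : (o : Int) - 1 - (cl + 1) = o - 1 - cl - 1 := by ring
    simp only [pvOc, pvCc, pvGo, List.zip_cons_cons, List.filter_cons]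
    by_cases h1 : c = '{'
    · subst h1
      have hiff : ∀ x : Int, (x - 1 - cl + 1 ≥ k) ↔ (k ≤ x - cl) := by intro x; omega
      by_cases hk : k ≤ o - cl <;>
          simp [hne, hk, hiff, ih] <;>
          (congr 1 <;> ring)
    · by_cases h2 : c = '}'
      · subst h2
        by_cases hk : k ≤ o - 1 - cl <;>
          simp [h1, hk, e2, ih]
      · by_cases hk : k ≤ o - 1 - cl <;>
          simp [h1, h2, hk, ih]

-- ===== VERDICT (by name: the statement is the Claim_ definition above) =====
theorem extract_json_content_under_N_layer_spec : Claim_equal_extract_json_content_under_N_layer := by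
  intro s k _
  unfold Spec_extract_json_content_under_N_layer
  unfold extract_json_content_under_N_layer extract_json_content_under_N_layer_alt
  simp only [pvFoldA, pvOcSpec, pvCcSpec, List.nil_append]
  rw [pvMain]
  norm_num
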